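-- pv_equiv track=rewrite | github.com/robmillersoftware/mtg-deckbuilder | src/explanation/deck_explainer.py | _analyze_card_synergies
-- ===== SOURCE A (Python) =====
-- from typing import Dict, List, Optional, Tuple
--
-- def _analyze_card_synergies(mainboard: List[Dict]) -> str:
--     """Identify and explain card synergies"""
--     # Look for common synergy patterns
--     card_names = [card['name'].lower() for card in mainboard]
--     synergies = []
--
--     # Tribal synergies
--     creature_types = ['knight', 'soldier', 'dragon', 'angel', 'demon', 'elemental']
--     for creature_type in creature_types:
--         type_cards = [name for name in card_names if creature_type in name]
--         if len(type_cards) >= 3: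
--             synergies.append(f"Tribal {creature_type.title()} theme with {len(type_cards)} related cards")
--
--     # Spell synergies
--     if len([name for name in card_names if any(word in name for word in ['bolt', 'burn', 'shock'])]) >= 3:
--         synergies.append("Burn spell synergy for direct damage strategy")
--
--     if len([name for name in card_names if any(word in name for word in ['counter', 'negate'])]) >= 2:
--         synergies.append("Counterspell package for control elements")
--
--     if not synergies:
--         synergies.append("Cards chosen for individual power level rather than specific synergies")
--
--     return "Key Synergies:\n" + "\n".join(f"- {synergy}" for synergy in synergies)
-- ===== SOURCE B (Python) =====
-- from typing import Dict, List
--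
-- def _analyze_card_synergies(mainboard: List[Dict]) -> str:
--     """Identify and explain card synergies (single pass over the card names)."""
--     knight = soldier = dragon = angel = demon = elemental = burn = ctr = 0
--     for card in mainboard:
--         name = card['name'].lower()
--         if 'knight' in name: knight += 1
--         if 'soldier' in name: soldier += 1
--         if 'dragon' in name: dragon += 1
--         if 'angel' in name: angel += 1
--         if 'demon' in name: demon += 1
--         if 'elemental' in name: elemental += 1
--         if 'bolt' in name or 'burn' in name or 'shock' in name: burn += 1
--         if 'counter' in name or 'negate' in name: ctr += 1
--     lines = []
--     for title, n in [('Knight', knight), ('Soldier', soldier), ('Dragon', dragon),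
--                      ('Angel', angel), ('Demon', demon), ('Elemental', elemental)]:
--         if n >= 3:
--             lines.append(f"- Tribal {title} theme with {n} related cards")
--     if burn >= 3:
--         lines.append("- Burn spell synergy for direct damage strategy")
--     if ctr >= 2:
--         lines.append("- Counterspell package for control elements")
--     if not lines:
--         lines.append("- Cards chosen for individual power level rather than specific synergies")
--     return "Key Synergies:\n" + "\n".join(lines)
-- ===== Notes on version B (the rewrite author's own statement) =====
-- stated objective: alternative
-- what changed: Replaces A's eight separate filter passes over the name list (one per creature type / keyword group) by a single pass over the cards that accumulates all eight counters at once, then emits the synergy lines directly from the counters.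
import Mathlib
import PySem

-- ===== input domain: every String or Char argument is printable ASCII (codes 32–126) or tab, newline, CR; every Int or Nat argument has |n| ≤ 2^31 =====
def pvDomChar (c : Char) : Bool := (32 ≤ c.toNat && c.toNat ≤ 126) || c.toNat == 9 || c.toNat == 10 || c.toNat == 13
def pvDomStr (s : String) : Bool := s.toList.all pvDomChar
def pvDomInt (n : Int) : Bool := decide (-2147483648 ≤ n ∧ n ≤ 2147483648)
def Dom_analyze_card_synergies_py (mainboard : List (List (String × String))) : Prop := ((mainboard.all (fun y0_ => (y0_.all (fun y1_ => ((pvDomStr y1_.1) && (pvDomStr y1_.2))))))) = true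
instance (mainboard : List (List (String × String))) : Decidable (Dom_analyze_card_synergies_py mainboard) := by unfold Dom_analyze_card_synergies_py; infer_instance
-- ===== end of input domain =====

-- B replaces A's eight separate filter passes over the names by one pass accumulating all eight counters; same output.

-- ===== PORT A =====
-- card['name'].lower() (same Python expression in A and B; Pre_ guarantees the key is present)
def pyNameLower (card : List (String × String)) : String :=
  PySem.Str.lower (((PySem.Dict.mk card).get? "name").getD "")

-- str.title(), hand-ported (exact on the ASCII domain: a character is uppercased iff the previous character is not a letter)
def pyTitleGo : List Char → Bool → List Char
  | [], _ => []
  | c :: cs, prevCased =>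
    (if prevCased then PySem.Chars.lowerChar c else PySem.Chars.upperChar c) :: pyTitleGo cs c.isAlpha

def pyTitle (s : String) : String := String.ofList (pyTitleGo s.toList false)

def analyze_card_synergies_py (mainboard : List (List (String × String))) : String :=
  let card_names := mainboard.map pyNameLower
  let creature_types : List String := ["knight", "soldier", "dragon", "angel", "demon", "elemental"]
  let synergies : List String :=
    creature_types.foldl (fun syn ct =>
      let type_cards := card_names.filter (fun name => PySem.Str.isIn ct name)
      if 3 ≤ type_cards.length then
        syn ++ ["Tribal " ++ pyTitle ct ++ " theme with " ++ PySem.Int.toStr (type_cards.length : Int) ++ " related cards"]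
      else syn) []
  let synergies :=
    if 3 ≤ (card_names.filter (fun name => ["bolt", "burn", "shock"].any (fun w => PySem.Str.isIn w name))).length then
      synergies ++ ["Burn spell synergy for direct damage strategy"]
    else synergies
  let synergies :=
    if 2 ≤ (card_names.filter (fun name => ["counter", "negate"].any (fun w => PySem.Str.isIn w name))).length then
      synergies ++ ["Counterspell package for control elements"]
    else synergies
  let synergies :=
    if synergies.isEmpty then ["Cards chosen for individual power level rather than specific synergies"] else synergies
  "Key Synergies:\n" ++ PySem.Str.join "\n" (synergies.map (fun s => "- " ++ s))

-- ===== PORT B =====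
def pvStep (st : Int × Int × Int × Int × Int × Int × Int × Int) (card : List (String × String)) :
    Int × Int × Int × Int × Int × Int × Int × Int :=
  let name := pyNameLower card
  (st.1 + (if PySem.Str.isIn "knight" name then 1 else 0),
   st.2.1 + (if PySem.Str.isIn "soldier" name then 1 else 0),
   st.2.2.1 + (if PySem.Str.isIn "dragon" name then 1 else 0),
   st.2.2.2.1 + (if PySem.Str.isIn "angel" name then 1 else 0),
   st.2.2.2.2.1 + (if PySem.Str.isIn "demon" name then 1 else 0),
   st.2.2.2.2.2.1 + (if PySem.Str.isIn "elemental" name then 1 else 0),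
   st.2.2.2.2.2.2.1 + (if PySem.Str.isIn "bolt" name || PySem.Str.isIn "burn" name || PySem.Str.isIn "shock" name then 1 else 0),
   st.2.2.2.2.2.2.2 + (if PySem.Str.isIn "counter" name || PySem.Str.isIn "negate" name then 1 else 0))

def analyze_card_synergies_py_alt (mainboard : List (List (String × String))) : String :=
  match mainboard.foldl pvStep (0, 0, 0, 0, 0, 0, 0, 0) with
  | (knight, soldier, dragon, angel, demon, elemental, burn, ctr) =>
    let lines : List String :=
      (if 3 ≤ knight then ["- Tribal Knight theme with " ++ PySem.Int.toStr knight ++ " related cards"] else []) ++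
      (if 3 ≤ soldier then ["- Tribal Soldier theme with " ++ PySem.Int.toStr soldier ++ " related cards"] else []) ++
      (if 3 ≤ dragon then ["- Tribal Dragon theme with " ++ PySem.Int.toStr dragon ++ " related cards"] else []) ++
      (if 3 ≤ angel then ["- Tribal Angel theme with " ++ PySem.Int.toStr angel ++ " related cards"] else []) ++
      (if 3 ≤ demon then ["- Tribal Demon theme with " ++ PySem.Int.toStr demon ++ " related cards"] else []) ++
      (if 3 ≤ elemental then ["- Tribal Elemental theme with " ++ PySem.Int.toStr elemental ++ " related cards"] else []) ++
      (if 3 ≤ burn then ["- Burn spell synergy for direct damage strategy"] else []) ++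
      (if 2 ≤ ctr then ["- Counterspell package for control elements"] else [])
    let lines :=
      if lines.isEmpty then ["- Cards chosen for individual power level rather than specific synergies"] else lines
    "Key Synergies:\n" ++ PySem.Str.join "\n" lines

-- ===== PRECONDITION & SPEC =====
-- Pre_: every card dict has a "name" key; A (and B) raise KeyError otherwise.
def Pre_analyze_card_synergies_py (mainboard : List (List (String × String))) : Prop :=
  ∀ card ∈ mainboard, ((PySem.Dict.mk card).get? "name").isSome
instance (mainboard : List (List (String × String))) : Decidable (Pre_analyze_card_synergies_py mainboard) := by
  unfold Pre_analyze_card_synergies_py; infer_instance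

def pvWitness_analyze_card_synergies_py : (List (List (String × String))) :=
  [[("name", "Lightning Bolt")], [("name", "Shock")], [("name", "Burnout")]]

def Spec_analyze_card_synergies_py (mainboard : List (List (String × String))) (out : String) : Prop := out = analyze_card_synergies_py_alt mainboard
instance (mainboard : List (List (String × String))) (out : String) : Decidable (Spec_analyze_card_synergies_py mainboard out) := by unfold Spec_analyze_card_synergies_py; infer_instance

-- ===== CLAIM (what is proved, stated in full; the proofs are below) =====
def Claim_equal_analyze_card_synergies_py : Prop := ∀ (mainboard : List (List (String × String))), Dom_analyze_card_synergies_py mainboard → Pre_analyze_card_synergies_py mainboard → Spec_analyze_card_synergies_py mainboard (analyze_card_synergies_py mainboard)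

-- ===== LEMMAS AND PROOFS =====

theorem pv_fold_counts (l : List (List (String × String))) (a : Int × Int × Int × Int × Int × Int × Int × Int) :
    l.foldl pvStep a =
      (a.1 + ((l.map pyNameLower).filter (fun n => PySem.Str.isIn "knight" n)).length,
       a.2.1 + ((l.map pyNameLower).filter (fun n => PySem.Str.isIn "soldier" n)).length,
       a.2.2.1 + ((l.map pyNameLower).filter (fun n => PySem.Str.isIn "dragon" n)).length,
       a.2.2.2.1 + ((l.map pyNameLower).filter (fun n => PySem.Str.isIn "angel" n)).length,
       a.2.2.2.2.1 + ((l.map pyNameLower).filter (fun n => PySem.Str.isIn "demon" n)).length,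
       a.2.2.2.2.2.1 + ((l.map pyNameLower).filter (fun n => PySem.Str.isIn "elemental" n)).length,
       a.2.2.2.2.2.2.1 + ((l.map pyNameLower).filter (fun n => PySem.Str.isIn "bolt" n || PySem.Str.isIn "burn" n || PySem.Str.isIn "shock" n)).length,
       a.2.2.2.2.2.2.2 + ((l.map pyNameLower).filter (fun n => PySem.Str.isIn "counter" n || PySem.Str.isIn "negate" n)).length) := by
  induction l generalizing a with
  | nil => simp
  | cons card rest ih =>
    simp only [List.foldl_cons, ih, List.map_cons, List.filter_cons, pvStep]
    simp only [Prod.mk.injEq]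
    refine ⟨?_, ?_, ?_, ?_, ?_, ?_, ?_, ?_⟩ <;> (split_ifs with h <;> simp; omega)

-- ===== VERDICT (by name: the statement is the Claim_ definition above) =====
theorem analyze_card_synergies_py_spec : Claim_equal_analyze_card_synergies_py := by
  intro mainboard _ _
  unfold Spec_analyze_card_synergies_py analyze_card_synergies_py analyze_card_synergies_py_alt
  rw [pv_fold_counts]
  have hpush : ∀ (x : List String) (c : Prop) [Decidable c] (s : String),
      (if c then x ++ [s] else x) = x ++ (if c then [s] else []) := by
    intro x c _ s; split_ifs <;> simp
  have h3 : ∀ n : Nat, ((3:Int) ≤ (n:Int)) ↔ 3 ≤ n := fun n => by omega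
  have h2 : ∀ n : Nat, ((2:Int) ≤ (n:Int)) ↔ 2 ≤ n := fun n => by omega
  have hF : ("- " ++ "Cards chosen for individual power level rather than specific synergies" : String) = "- Cards chosen for individual power level rather than specific synergies" := rfl
  have hB : ("- " ++ "Burn spell synergy for direct damage strategy" : String) = "- Burn spell synergy for direct damage strategy" := rfl
  have hC : ("- " ++ "Counterspell package for control elements" : String) = "- Counterspell package for control elements" := rfl
  have hie : ∀ (c : Prop) [Decidable c] (s : String), ((if c then [s] else []) = ([] : List String)) ↔ ¬ c := by
    intro c _ s; split_ifs with h <;> simp [h]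
  have hKn : ∀ s : String, ("- " ++ ("Tribal " ++ pyTitle "knight" ++ " theme with " ++ s ++ " related cards")) = "- Tribal Knight theme with " ++ s ++ " related cards" := by
    intro s
    rw [show ("- Tribal Knight theme with " : String) = "- " ++ ("Tribal " ++ pyTitle "knight" ++ " theme with ") from rfl]
    simp [String.append_assoc]
  have hSo : ∀ s : String, ("- " ++ ("Tribal " ++ pyTitle "soldier" ++ " theme with " ++ s ++ " related cards")) = "- Tribal Soldier theme with " ++ s ++ " related cards" := by
    intro s
    rw [show ("- Tribal Soldier theme with " : String) = "- " ++ ("Tribal " ++ pyTitle "soldier" ++ " theme with ") from rfl]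
    simp [String.append_assoc]
  have hDr : ∀ s : String, ("- " ++ ("Tribal " ++ pyTitle "dragon" ++ " theme with " ++ s ++ " related cards")) = "- Tribal Dragon theme with " ++ s ++ " related cards" := by
    intro s
    rw [show ("- Tribal Dragon theme with " : String) = "- " ++ ("Tribal " ++ pyTitle "dragon" ++ " theme with ") from rfl]
    simp [String.append_assoc]
  have hAn : ∀ s : String, ("- " ++ ("Tribal " ++ pyTitle "angel" ++ " theme with " ++ s ++ " related cards")) = "- Tribal Angel theme with " ++ s ++ " related cards" := by
    intro s
    rw [show ("- Tribal Angel theme with " : String) = "- " ++ ("Tribal " ++ pyTitle "angel" ++ " theme with ") from rfl]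
    simp [String.append_assoc]
  have hDe : ∀ s : String, ("- " ++ ("Tribal " ++ pyTitle "demon" ++ " theme with " ++ s ++ " related cards")) = "- Tribal Demon theme with " ++ s ++ " related cards" := by
    intro s
    rw [show ("- Tribal Demon theme with " : String) = "- " ++ ("Tribal " ++ pyTitle "demon" ++ " theme with ") from rfl]
    simp [String.append_assoc]
  have hEl : ∀ s : String, ("- " ++ ("Tribal " ++ pyTitle "elemental" ++ " theme with " ++ s ++ " related cards")) = "- Tribal Elemental theme with " ++ s ++ " related cards" := by
    intro s
    rw [show ("- Tribal Elemental theme with " : String) = "- " ++ ("Tribal " ++ pyTitle "elemental" ++ " theme with ") from rfl]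
    simp [String.append_assoc]
  simp only [zero_add, List.foldl_cons, List.foldl_nil, hpush, List.nil_append, h3, h2,
    List.any_cons, List.any_nil, Bool.or_false, Bool.or_assoc,
    List.map_append, apply_ite (List.map (fun s : String => "- " ++ s)), List.map_cons, List.map_nil,
    hKn, hSo, hDr, hAn, hDe, hEl,
    List.isEmpty_iff, List.append_eq_nil_iff, hie, hF, hB, hC]
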